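-- pv_equiv track=rewrite | github.com/pypi-data/pypi-mirror-92 | packages/Leytonium/Leytonium-5.tar.gz/Leytonium-5/diffuse/viewer/util.py | cutBlocks
-- ===== SOURCE A (Python) =====
-- def cutBlocks(i, blocks):
--     pre, post, nlines = [], [], 0
--     for b in blocks:
--         if nlines >= i:
--             post.append(b)
--         elif nlines + b <= i:
--             pre.append(b)
--         else:
--             n = i - nlines
--             pre.append(n)
--             post.append(b - n)
--         nlines += b
--     return pre, post
-- ===== SOURCE B (Python) =====
-- def cutBlocks(i, blocks):
--     starts = [0]
--     for b in blocks:
--         starts.append(starts[-1] + b)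
--     pairs = list(zip(starts, blocks))
--     pre = [b if s + b <= i else i - s for s, b in pairs if s < i]
--     post = [b if s >= i else s + b - i for s, b in pairs if s >= i or s + b > i]
--     return pre, post
-- ===== Notes on version B (the rewrite author's own statement) =====
-- stated objective: alternative
-- what changed: Replaces the single stateful loop that triages each block with a running line counter by a precomputed exclusive prefix-sum table followed by two stateless filter/map comprehensions that classify each (start, block) pair independently.
import Mathlib
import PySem

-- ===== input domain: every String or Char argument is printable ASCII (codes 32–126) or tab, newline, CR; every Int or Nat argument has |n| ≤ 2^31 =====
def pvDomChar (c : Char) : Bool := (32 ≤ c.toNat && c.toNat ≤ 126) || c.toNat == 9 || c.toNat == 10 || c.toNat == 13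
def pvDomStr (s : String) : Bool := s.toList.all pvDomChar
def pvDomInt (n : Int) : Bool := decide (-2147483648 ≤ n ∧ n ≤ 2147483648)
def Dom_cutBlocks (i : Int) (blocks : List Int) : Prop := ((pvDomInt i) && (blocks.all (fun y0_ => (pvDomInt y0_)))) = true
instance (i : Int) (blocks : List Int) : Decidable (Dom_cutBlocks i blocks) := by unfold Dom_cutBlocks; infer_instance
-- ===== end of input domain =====

-- B replaces A's stateful triage loop by an exclusive prefix-sum table plus two
-- stateless filter/map passes; objective: alternative decomposition (same cost).

-- ===== PORT A =====
-- step of A's for-loop: state is (pre, post, nlines)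
def cutStep (i : Int) (st : List Int × List Int × Int) (b : Int) : List Int × List Int × Int :=
  let pre := st.1; let post := st.2.1; let nlines := st.2.2
  if nlines ≥ i then (pre, post ++ [b], nlines + b)
  else if nlines + b ≤ i then (pre ++ [b], post, nlines + b)
  else
    let n := i - nlines
    (pre ++ [n], post ++ [b - n], nlines + b)

def cutBlocks (i : Int) (blocks : List Int) : List Int × List Int :=
  let st := blocks.foldl (cutStep i) ([], [], 0)
  (st.1, st.2.1)

-- ===== PORT B =====
-- exclusive prefix sums zipped with the blocks (Python: starts list, then zip)
def altPairs (acc : Int) : List Int → List (Int × Int)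
  | [] => []
  | b :: bs => (acc, b) :: altPairs (acc + b) bs

def altPre (i : Int) (pairs : List (Int × Int)) : List Int :=
  (pairs.filter (fun p => decide (p.1 < i))).map
    (fun p => if p.1 + p.2 ≤ i then p.2 else i - p.1)

def altPost (i : Int) (pairs : List (Int × Int)) : List Int :=
  (pairs.filter (fun p => decide (p.1 ≥ i) || decide (p.1 + p.2 > i))).map
    (fun p => if p.1 ≥ i then p.2 else p.1 + p.2 - i)

def cutBlocks_alt (i : Int) (blocks : List Int) : List Int × List Int :=
  let pairs := altPairs 0 blocks
  (altPre i pairs, altPost i pairs)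

-- ===== PRECONDITION & SPEC =====
def Spec_cutBlocks (i : Int) (blocks : List Int) (out : List Int × List Int) : Prop := out = cutBlocks_alt i blocks
instance (i : Int) (blocks : List Int) (out : List Int × List Int) : Decidable (Spec_cutBlocks i blocks out) := by unfold Spec_cutBlocks; infer_instance

-- ===== CLAIM (what is proved, stated in full; the proofs are below) =====
def Claim_equal_cutBlocks : Prop := ∀ (i : Int) (blocks : List Int), Dom_cutBlocks i blocks → Spec_cutBlocks i blocks (cutBlocks i blocks)

-- ===== LEMMAS AND PROOFS =====

-- loop invariant: A's fold from state (pre, post, s) appends exactly B's two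
-- classified lists computed from prefix sums started at s
lemma cutBlocks_fold_char (i : Int) : ∀ (blocks : List Int) (pre post : List Int) (s : Int),
    blocks.foldl (cutStep i) (pre, post, s) =
      (pre ++ altPre i (altPairs s blocks),
       post ++ altPost i (altPairs s blocks),
       s + blocks.sum) := by
  intro blocks
  induction blocks with
  | nil => intro pre post s; simp [altPairs, altPre, altPost]
  | cons b bs ih =>
    intro pre post s
    simp only [List.foldl_cons, cutStep, altPairs]
    by_cases h1 : s ≥ i
    · simp only [if_pos h1, ih]
      simp [altPre, altPost, h1, List.append_assoc, List.sum_cons]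
      omega
    · simp only [if_neg h1]
      by_cases h2 : s + b ≤ i
      · simp only [if_pos h2, ih]
        have h1' : s < i := lt_of_not_ge h1
        have h3 : ¬ (s ≥ i) := h1
        simp [altPre, altPost, h1', h2, h3, not_lt.mpr h2, List.append_assoc, List.sum_cons]
        omega
      · simp only [if_neg h2, ih]
        have h1' : s < i := lt_of_not_ge h1
        have h2' : s + b > i := lt_of_not_ge h2
        simp [altPre, altPost, h1', h2', not_le.mpr h2', h1, List.append_assoc, List.sum_cons]
        omega

-- ===== VERDICT (by name: the statement is the Claim_ definition above) =====
theorem cutBlocks_spec : Claim_equal_cutBlocks := by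
  intro i blocks _
  unfold Spec_cutBlocks cutBlocks cutBlocks_alt
  simp [cutBlocks_fold_char]
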